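-- pv_equiv track=rewrite | github.com/paiml/depyler | examples/hard_counter_class.py | counter_step
-- ===== SOURCE A (Python) =====
-- def counter_step(start: int, steps: int, max_val: int) -> int:
--     """Increment a counter 'steps' times and return final value."""
--     val: int = start
--     i: int = 0
--     while i < steps:
--         if val < max_val:
--             val = val + 1
--         i = i + 1
--     return val
-- ===== SOURCE B (Python) =====
-- def counter_step(start: int, steps: int, max_val: int) -> int:
--     """Closed form: the loop adds min(steps, max_val - start) increments when
--     start < max_val and steps > 0, otherwise none."""
--     return max(start, min(start + steps, max_val))
-- ===== Notes on version B (the rewrite author's own statement) =====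
-- stated objective: faster
-- what changed: Replaces the O(steps) increment loop with the closed form max(start, min(start + steps, max_val)).
import Mathlib
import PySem

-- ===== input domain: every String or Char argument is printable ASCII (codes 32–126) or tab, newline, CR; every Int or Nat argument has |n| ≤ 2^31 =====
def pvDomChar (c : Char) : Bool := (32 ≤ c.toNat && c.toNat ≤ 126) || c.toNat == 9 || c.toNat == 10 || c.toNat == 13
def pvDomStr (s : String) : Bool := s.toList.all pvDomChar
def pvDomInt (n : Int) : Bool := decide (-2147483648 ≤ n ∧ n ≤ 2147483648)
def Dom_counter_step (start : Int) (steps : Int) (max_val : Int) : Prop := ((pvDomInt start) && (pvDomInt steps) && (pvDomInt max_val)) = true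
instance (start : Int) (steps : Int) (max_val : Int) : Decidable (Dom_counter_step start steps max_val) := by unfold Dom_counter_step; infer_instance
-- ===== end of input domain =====

-- B replaces A's O(steps) increment loop by the O(1) closed form max(start, min(start+steps, max_val)).

-- ===== PORT A =====
-- A's while loop: state (val, i), one iteration per i < steps.
def counterLoopA (steps : Int) (max_val : Int) (val : Int) (i : Int) : Int :=
  if _h : i < steps then
    counterLoopA steps max_val (if val < max_val then val + 1 else val) (i + 1)
  else
    val
termination_by (steps - i).toNat
decreasing_by omega

def counter_step (start : Int) (steps : Int) (max_val : Int) : Int :=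
  counterLoopA steps max_val start 0

-- ===== PORT B =====
def counter_step_alt (start : Int) (steps : Int) (max_val : Int) : Int :=
  max start (min (start + steps) max_val)

-- ===== PRECONDITION & SPEC =====
def Spec_counter_step (start : Int) (steps : Int) (max_val : Int) (out : Int) : Prop := out = counter_step_alt start steps max_val
instance (start : Int) (steps : Int) (max_val : Int) (out : Int) : Decidable (Spec_counter_step start steps max_val out) := by unfold Spec_counter_step; infer_instance

-- ===== CLAIM (what is proved, stated in full; the proofs are below) =====
def Claim_equal_counter_step : Prop := ∀ (start : Int) (steps : Int) (max_val : Int), Dom_counter_step start steps max_val → Spec_counter_step start steps max_val (counter_step start steps max_val)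

-- ===== LEMMAS AND PROOFS =====
-- Loop invariant: from state (val, i) the loop returns max val (min (val + (steps - i)) max_val)
-- (with the remaining-step count clamped at 0).
theorem counterLoopA_eq (steps max_val : Int) :
    ∀ (n : Nat) (val i : Int), (steps - i).toNat = n →
      counterLoopA steps max_val val i = max val (min (val + max (steps - i) 0) max_val) := by
  intro n
  induction n with
  | zero =>
      intro val i hn
      rw [counterLoopA]
      have : ¬ i < steps := by omega
      simp [this]
      omega
  | succ k ih =>
      intro val i hn
      rw [counterLoopA]
      have hlt : i < steps := by omega
      simp only [hlt, dif_pos]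
      rw [ih _ (i + 1) (by omega)]
      by_cases h : val < max_val <;> simp [h] <;> omega

theorem counter_step_spec : Claim_equal_counter_step := by
  intro start steps max_val _
  unfold Spec_counter_step counter_step counter_step_alt
  rw [counterLoopA_eq steps max_val (steps - 0).toNat start 0 rfl]
  omega
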